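-- pv_equiv track=rewrite | github.com/travelDK-97/Document-Extractor | main_pipeline.py | extract_sections_for_db
-- ===== SOURCE A (Python) =====
-- def extract_sections_for_db(md_text):
--     """将 Markdown 解析为一级标题及其内容的字典列表"""
--     records = []
--     current_title = "前言/未分类"
--     current_content = []
--
--     for line in md_text.split('\n'):
--         if line.startswith('# '):
--             if current_content:
--                 records.append({"title": current_title, "content": "\n".join(current_content).strip()})
--             current_title = line[2:].strip()
--             current_content = []
--         else:
--             current_content.append(line)
--
--     if current_content:
--         records.append({"title": current_title, "content": "\n".join(current_content).strip()})
--
--     return records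
-- ===== SOURCE B (Python) =====
-- def extract_sections_for_db(md_text):
--     """将 Markdown 解析为一级标题及其内容的字典列表"""
--     def span_body(xs):
--         k = 0
--         while k < len(xs) and not xs[k].startswith('# '):
--             k += 1
--         return xs[:k], xs[k:]
--
--     def record(title, body):
--         if body:
--             return [{"title": title, "content": "\n".join(body).strip()}]
--         return []
--
--     def go(rest):
--         out = []
--         while rest:
--             head = rest[0]
--             body, rest = span_body(rest[1:])
--             out += record(head[2:].strip(), body)
--         return out
--
--     pre, rest = span_body(md_text.split('\n'))
--     return record("前言/未分类", pre) + go(rest)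
-- ===== Notes on version B (the rewrite author's own statement) =====
-- stated objective: alternative
-- what changed: Replaced A's accumulate-and-flush state machine (current_title/current_content mutated across one line loop) by a span-based segmentation: take the preamble with one span, then repeatedly consume a heading and span off its body slice, emitting a record per non-empty slice.
import Mathlib
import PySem

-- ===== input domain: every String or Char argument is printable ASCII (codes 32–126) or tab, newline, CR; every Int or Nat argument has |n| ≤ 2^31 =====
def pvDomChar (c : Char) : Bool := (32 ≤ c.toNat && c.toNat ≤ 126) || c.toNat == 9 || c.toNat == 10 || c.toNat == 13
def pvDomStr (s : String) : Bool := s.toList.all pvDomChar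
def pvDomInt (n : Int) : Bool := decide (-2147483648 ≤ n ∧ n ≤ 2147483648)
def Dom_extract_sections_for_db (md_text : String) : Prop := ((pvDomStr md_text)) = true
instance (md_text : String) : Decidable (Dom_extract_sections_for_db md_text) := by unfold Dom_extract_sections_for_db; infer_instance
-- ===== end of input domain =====

-- B replaces A's accumulate-and-flush line loop by span-based segmentation (preamble span, then heading+body spans); objective: alternative decomposition, same cost.

-- ===== PORT A =====
-- shared record builder: {"title": t, "content": "\n".join(c).strip()}
def pvRec (t : String) (c : List String) : List (String × String) :=
  [("title", t), ("content", PySem.Str.strip (PySem.Str.join "\n" c))]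

def extract_sections_for_db (md_text : String) : List (List (String × String)) :=
  let s := ((PySem.Str.split? md_text "\n").getD []).foldl
    (fun (st : List (List (String × String)) × String × List String) line =>
      if PySem.Str.startswith line "# " then
        ((if st.2.2 ≠ [] then st.1 ++ [pvRec st.2.1 st.2.2] else st.1),
         PySem.Str.strip (PySem.Str.slice line (some 2) none), [])
      else (st.1, st.2.1, st.2.2 ++ [line]))
    (([], "前言/未分类", []) : List (List (String × String)) × String × List String)
  if s.2.2 ≠ [] then s.1 ++ [pvRec s.2.1 s.2.2] else s.1

-- ===== PORT B =====
def pvIsBody (l : String) : Bool := !(PySem.Str.startswith l "# ")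

def pvRecord (t : String) (body : List String) : List (List (String × String)) :=
  if body ≠ [] then [pvRec t body] else []

def pvGo : List String → List (List (String × String))
  | [] => []
  | h :: rest =>
    pvRecord (PySem.Str.strip (PySem.Str.slice h (some 2) none)) (rest.takeWhile pvIsBody)
      ++ pvGo (rest.dropWhile pvIsBody)
termination_by l => l.length
decreasing_by
  exact Nat.lt_succ_of_le (List.length_dropWhile_le _ _)

def extract_sections_for_db_alt (md_text : String) : List (List (String × String)) :=
  let lines := (PySem.Str.split? md_text "\n").getD []
  pvRecord "前言/未分类" (lines.takeWhile pvIsBody) ++ pvGo (lines.dropWhile pvIsBody)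

-- ===== PRECONDITION & SPEC =====
def Spec_extract_sections_for_db (md_text : String) (out : List (List (String × String))) : Prop := out = extract_sections_for_db_alt md_text
instance (md_text : String) (out : List (List (String × String))) : Decidable (Spec_extract_sections_for_db md_text out) := by unfold Spec_extract_sections_for_db; infer_instance

-- ===== CLAIM (what is proved, stated in full; the proofs are below) =====
def Claim_equal_extract_sections_for_db : Prop := ∀ (md_text : String), Dom_extract_sections_for_db md_text → Spec_extract_sections_for_db md_text (extract_sections_for_db md_text)

-- ===== LEMMAS AND PROOFS =====

-- the remainder of A's loop from state (t, c), records factored out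
def pvRest (t : String) (c : List String) : List String → List (List (String × String))
  | [] => if c ≠ [] then [pvRec t c] else []
  | l :: ls =>
    if PySem.Str.startswith l "# " then
      (if c ≠ [] then [pvRec t c] else [])
        ++ pvRest (PySem.Str.strip (PySem.Str.slice l (some 2) none)) [] ls
    else pvRest t (c ++ [l]) ls

theorem pvFoldA (ls : List String) : ∀ (recs : List (List (String × String))) (t : String) (c : List String),
    (let s := ls.foldl
      (fun (st : List (List (String × String)) × String × List String) line =>
        if PySem.Str.startswith line "# " then
          ((if st.2.2 ≠ [] then st.1 ++ [pvRec st.2.1 st.2.2] else st.1),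
           PySem.Str.strip (PySem.Str.slice line (some 2) none), [])
        else (st.1, st.2.1, st.2.2 ++ [line])) (recs, t, c)
     if s.2.2 ≠ [] then s.1 ++ [pvRec s.2.1 s.2.2] else s.1)
    = recs ++ pvRest t c ls := by
  induction ls with
  | nil =>
    intro recs t c
    simp only [List.foldl, pvRest]
    split <;> simp
  | cons l ls ih =>
    intro recs t c
    simp only [List.foldl, pvRest]
    by_cases h : PySem.Str.startswith l "# "
    · simp only [h, if_pos]
      rw [ih]
      by_cases hc : c ≠ [] <;> simp [hc]
    · simp only [h, if_false, Bool.false_eq_true]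
      rw [ih]

theorem pvRestGo (ls : List String) : ∀ (t : String) (c : List String),
    pvRest t c ls = pvRecord t (c ++ ls.takeWhile pvIsBody) ++ pvGo (ls.dropWhile pvIsBody) := by
  induction ls with
  | nil => intro t c; simp [pvRest, pvRecord, pvGo]
  | cons l ls ih =>
    intro t c
    by_cases h : PySem.Str.startswith l "# "
    · have hb : pvIsBody l = false := by unfold pvIsBody; rw [h]; rfl
      simp only [pvRest, h, if_true, List.takeWhile_cons, List.dropWhile_cons, hb,
        Bool.false_eq_true, if_false]
      rw [ih, pvGo]
      simp [pvRecord]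
    · have hb : pvIsBody l = true := by unfold pvIsBody; rw [eq_false_of_ne_true h]; rfl
      simp only [pvRest, h, Bool.false_eq_true, if_false, List.takeWhile_cons,
        List.dropWhile_cons, hb, if_true]
      rw [ih]
      simp

-- ===== VERDICT (by name: the statement is the Claim_ definition above) =====
theorem extract_sections_for_db_spec : Claim_equal_extract_sections_for_db := by
  intro md _
  unfold Spec_extract_sections_for_db extract_sections_for_db extract_sections_for_db_alt
  rw [pvFoldA, pvRestGo]
  simp
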